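-- pv_equiv track=rewrite | github.com/austencloud/tka-studio | src/desktop/modern/src/application/services/settings/beat_layout_settings_manager.py | get_layout_options_for_length
-- ===== SOURCE A (Python) =====
-- from typing import Dict, Tuple
--
-- def get_layout_options_for_length(
--     sequence_length: int
-- ) -> Dict[str, Tuple[int, int]]:
--     """Get available layout options for a sequence length"""
--     options = {}
--
--     # Add some common layout variations
--     length = sequence_length
--
--     # Single row
--     options[f"1 × {length}"] = (1, length)
--
--     # Try different factorizations
--     for rows in range(1, length + 1):
--         if length % rows == 0:
--             cols = length // rows
--             options[f"{rows} × {cols}"] = (rows, cols)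
--
--     # Add some non-perfect grids if reasonable
--     import math
--
--     sqrt_len = int(math.sqrt(length))
--
--     for r in range(max(1, sqrt_len - 1), sqrt_len + 3):
--         c = math.ceil(length / r)
--         if r * c >= length:
--             options[f"{r} × {c}"] = (r, c)
--
--     return options
-- ===== SOURCE B (Python) =====
-- import math
--
-- def get_layout_options_for_length(sequence_length):
--     """Get available layout options for a sequence length (divisor pairs via sqrt enumeration)."""
--     length = sequence_length
--     s = math.isqrt(length)  # raises ValueError for negative length, like math.sqrt in A
--     small = []
--     large = []
--     for d in range(1, s + 1):
--         if length % d == 0: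
--             small.append(d)
--             if d * d != length:
--                 large.append(length // d)
--     options = {}
--     for r in small:
--         options[f"{r} × {length // r}"] = (r, length // r)
--     for r in reversed(large):
--         options[f"{r} × {length // r}"] = (r, length // r)
--     for r in range(max(1, s - 1), s + 3):
--         c = -(-length // r)  # exact ceil division
--         options[f"{r} × {c}"] = (r, c)
--     return options
-- ===== Notes on version B (the rewrite author's own statement) =====
-- stated objective: faster
-- what changed: B enumerates divisors only up to sqrt(length), emitting small divisors forward and their large cofactors in reverse, instead of A's scan over every candidate rows value from 1 to length.
import Mathlib
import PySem

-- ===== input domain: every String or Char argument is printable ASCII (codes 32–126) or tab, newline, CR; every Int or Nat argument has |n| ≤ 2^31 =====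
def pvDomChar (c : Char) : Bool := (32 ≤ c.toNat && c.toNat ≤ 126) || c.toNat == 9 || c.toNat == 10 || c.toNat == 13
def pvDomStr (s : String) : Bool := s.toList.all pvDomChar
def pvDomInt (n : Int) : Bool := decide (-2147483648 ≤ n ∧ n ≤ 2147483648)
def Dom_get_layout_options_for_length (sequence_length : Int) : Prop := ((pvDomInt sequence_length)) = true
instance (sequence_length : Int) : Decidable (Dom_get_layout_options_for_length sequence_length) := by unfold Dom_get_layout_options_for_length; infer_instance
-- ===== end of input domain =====

-- B enumerates divisor pairs only up to √length (appending the large cofactors back-to-front)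
-- instead of A's scan of every rows value from 1 to length; same dict, built in the same order.

-- ===== PORT A =====
-- shared helper: integer square root by counting up; pvIsqrt n = ⌊√n⌋ for 0 ≤ n.
-- It ports Python's int(math.sqrt(length)) (and B's math.isqrt) exactly on the admitted
-- domain 0 ≤ n ≤ 2^31: there the double sqrt is correctly rounded and its error is far
-- below the distance from √n to any other integer, so int(math.sqrt(n)) = isqrt(n).
-- (For negative n Python raises ValueError: such inputs are outside Pre_.)
def pvIsqrtGo (n d : Int) : Nat → Int
  | 0 => d
  | fuel + 1 => if (d + 1) * (d + 1) ≤ n then pvIsqrtGo n (d + 1) fuel else d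

def pvIsqrt (n : Int) : Int := pvIsqrtGo n 0 n.toNat

def get_layout_options_for_length (sequence_length : Int) : List (String × Int × Int) :=
  -- options = {}; options[f"1 × {length}"] = (1, length)
  let options : PySem.Dict String (Int × Int) :=
    PySem.Dict.empty.insert ("1 × " ++ PySem.Int.toStr sequence_length) (1, sequence_length)
  -- for rows in range(1, length + 1): if length % rows == 0: cols = length // rows; options[...] = (rows, cols)
  let options := (PySem.List.pyRange 1 (sequence_length + 1)).foldl (fun options rows =>
    if PySem.Int.mod sequence_length rows == 0 then
      let cols := PySem.Int.floordiv sequence_length rows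
      options.insert (PySem.Int.toStr rows ++ " × " ++ PySem.Int.toStr cols) (rows, cols)
    else options) options
  -- sqrt_len = int(math.sqrt(length))   (see pvIsqrt comment: exact on the admitted domain)
  let sqrt_len := pvIsqrt sequence_length
  -- for r in range(max(1, sqrt_len - 1), sqrt_len + 3): c = math.ceil(length / r); if r * c >= length: ...
  -- math.ceil(length / r) ported as -((-length) // r): exact for |length| ≤ 2^31 and r ≥ 1,
  -- since the float quotient's rounding error (≤ 2^-22) is below 1/r for any non-integer quotient.
  let options := (PySem.List.pyRange (max 1 (sqrt_len - 1)) (sqrt_len + 3)).foldl (fun options r =>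
    let c := -(PySem.Int.floordiv (-sequence_length) r)
    if sequence_length ≤ r * c then
      options.insert (PySem.Int.toStr r ++ " × " ++ PySem.Int.toStr c) (r, c)
    else options) options
  options.items

-- ===== PORT B =====
def get_layout_options_for_length_alt (sequence_length : Int) : List (String × Int × Int) :=
  -- s = math.isqrt(length)   (raises ValueError for negative length: outside Pre_)
  let s := pvIsqrt sequence_length
  -- for d in range(1, s + 1): if length % d == 0: small.append(d); if d*d != length: large.append(length // d)
  let sl := (PySem.List.pyRange 1 (s + 1)).foldl (fun (sl : List Int × List Int) d =>
    if PySem.Int.mod sequence_length d == 0 then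
      (sl.1 ++ [d],
       if d * d != sequence_length then sl.2 ++ [PySem.Int.floordiv sequence_length d] else sl.2)
    else sl) ([], [])
  -- for r in small: options[f"{r} × {length // r}"] = (r, length // r)
  let options := sl.1.foldl (fun (options : PySem.Dict String (Int × Int)) r =>
    options.insert (PySem.Int.toStr r ++ " × " ++ PySem.Int.toStr (PySem.Int.floordiv sequence_length r))
      (r, PySem.Int.floordiv sequence_length r)) PySem.Dict.empty
  -- for r in reversed(large): options[f"{r} × {length // r}"] = (r, length // r)
  let options := sl.2.reverse.foldl (fun (options : PySem.Dict String (Int × Int)) r =>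
    options.insert (PySem.Int.toStr r ++ " × " ++ PySem.Int.toStr (PySem.Int.floordiv sequence_length r))
      (r, PySem.Int.floordiv sequence_length r)) options
  -- for r in range(max(1, s - 1), s + 3): c = -(-length // r); options[f"{r} × {c}"] = (r, c)
  let options := (PySem.List.pyRange (max 1 (s - 1)) (s + 3)).foldl (fun options r =>
    let c := -(PySem.Int.floordiv (-sequence_length) r)
    options.insert (PySem.Int.toStr r ++ " × " ++ PySem.Int.toStr c) (r, c)) options
  options.items

-- ===== PRECONDITION & SPEC =====
-- Pre_ excludes exactly the negative lengths, on which A raises ValueError (math.sqrt of a negative).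
def Pre_get_layout_options_for_length (sequence_length : Int) : Prop := 0 ≤ sequence_length
instance (sequence_length : Int) : Decidable (Pre_get_layout_options_for_length sequence_length) := by
  unfold Pre_get_layout_options_for_length; infer_instance

def pvWitness_get_layout_options_for_length : Int := 6

def Spec_get_layout_options_for_length (sequence_length : Int) (out : List (String × Int × Int)) : Prop := out = get_layout_options_for_length_alt sequence_length
instance (sequence_length : Int) (out : List (String × Int × Int)) : Decidable (Spec_get_layout_options_for_length sequence_length out) := by unfold Spec_get_layout_options_for_length; infer_instance

-- ===== CLAIM (what is proved, stated in full; the proofs are below) =====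
def Claim_equal_get_layout_options_for_length : Prop := ∀ (sequence_length : Int), Dom_get_layout_options_for_length sequence_length → Pre_get_layout_options_for_length sequence_length → Spec_get_layout_options_for_length sequence_length (get_layout_options_for_length sequence_length)

-- ===== LEMMAS AND PROOFS =====

lemma pvIsqrtGo_spec (n : Int) (fuel : Nat) (d : Int) (hd : 0 ≤ d) (hdn : d * d ≤ n) :
    d ≤ pvIsqrtGo n d fuel ∧ pvIsqrtGo n d fuel * pvIsqrtGo n d fuel ≤ n ∧
      (n < (pvIsqrtGo n d fuel + 1) * (pvIsqrtGo n d fuel + 1) ∨ pvIsqrtGo n d fuel = d + fuel) := by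
  induction fuel generalizing d with
  | zero => simp [pvIsqrtGo, hdn]
  | succ fuel ih =>
    rw [pvIsqrtGo]
    split
    · rename_i h
      obtain ⟨h1, h2, h3⟩ := ih (d + 1) (by omega) h
      refine ⟨by omega, h2, ?_⟩
      rcases h3 with h3 | h3
      · exact Or.inl h3
      · exact Or.inr (by omega)
    · rename_i h
      exact ⟨le_refl d, hdn, Or.inl (by omega)⟩

lemma pvIsqrt_spec (n : Int) (hn : 0 ≤ n) :
    0 ≤ pvIsqrt n ∧ pvIsqrt n * pvIsqrt n ≤ n ∧ n < (pvIsqrt n + 1) * (pvIsqrt n + 1) := by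
  obtain ⟨h1, h2, h3⟩ := pvIsqrtGo_spec n n.toNat 0 le_rfl (by simpa using hn)
  refine ⟨h1, h2, ?_⟩
  rcases h3 with h3 | h3
  · exact h3
  · rw [pvIsqrt] at *
    rw [h3] at h2 ⊢
    simp only [zero_add] at *
    have htn : (n.toNat : Int) = n := Int.toNat_of_nonneg hn
    rw [htn] at h2 ⊢
    nlinarith

lemma le_pvIsqrt_iff (n d : Int) (hn : 0 ≤ n) (hd : 0 < d) : d ≤ pvIsqrt n ↔ d * d ≤ n := by
  obtain ⟨h1, h2, h3⟩ := pvIsqrt_spec n hn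
  constructor
  · intro h; nlinarith
  · intro h
    by_contra hc
    push_neg at hc
    nlinarith

-- B's single divisor loop with its two accumulators, characterised as filter/map
lemma pvPairFold (n : Int) (L : List Int) (a b : List Int) :
    L.foldl (fun (sl : List Int × List Int) d =>
      if PySem.Int.mod n d == 0 then
        (sl.1 ++ [d], if d * d != n then sl.2 ++ [PySem.Int.floordiv n d] else sl.2)
      else sl) (a, b)
    = (a ++ L.filter (fun d => PySem.Int.mod n d == 0),
       b ++ (L.filter (fun d => PySem.Int.mod n d == 0 && d * d != n)).map
              (fun d => PySem.Int.floordiv n d)) := by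
  induction L generalizing a b with
  | nil => simp
  | cons x t ih =>
    simp only [List.foldl_cons, List.filter_cons]
    by_cases hx : (PySem.Int.mod n x == 0) = true
    · rw [if_pos hx]
      by_cases hq : (x * x != n) = true
      · rw [if_pos hq, ih]
        simp [hx, hq]
      · rw [if_neg hq, ih]
        simp only [hx, Bool.true_and]
        simp [hq]
    · rw [if_neg hx, ih]
      simp [hx]

-- the crux: divisors of n listed in increasing order = small divisors ++ reversed large cofactors
lemma pvDivisorsSplit (n : Int) (hn : 1 ≤ n) :
    (PySem.List.pyRange 1 (n + 1)).filter (fun d => PySem.Int.mod n d == 0)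
      = (PySem.List.pyRange 1 (pvIsqrt n + 1)).filter (fun d => PySem.Int.mod n d == 0)
        ++ (((PySem.List.pyRange 1 (pvIsqrt n + 1)).filter
              (fun d => PySem.Int.mod n d == 0 && d * d != n)).map
             (fun d => PySem.Int.floordiv n d)).reverse := by
  have hn0 : (0 : Int) ≤ n := by omega
  set s := pvIsqrt n with hs
  obtain ⟨hs0, hs1, hs2⟩ := pvIsqrt_spec n hn0
  have hs3 : 1 ≤ s := (le_pvIsqrt_iff n 1 hn0 one_pos).2 (by nlinarith)
  have hsn : s ≤ n := by nlinarith
  have hP : ∀ d : Int, (PySem.Int.mod n d == 0) = true ↔ d ∣ n := by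
    intro d; rw [beq_iff_eq, PySem.Int.mod_eq_zero_iff_dvd]
  have hQ : ∀ d : Int, (PySem.Int.mod n d == 0 && d * d != n) = true ↔ d ∣ n ∧ d * d ≠ n := by
    intro d; rw [Bool.and_eq_true, hP, bne_iff_ne]
  have hdivpos : ∀ d : Int, 0 < d → d ∣ n → 0 < n / d ∧ n / d * d = n := by
    intro d hd hdvd
    have h2 := Int.ediv_mul_cancel hdvd
    exact ⟨by nlinarith [h2], h2⟩
  have hfd : ∀ d : Int, 0 < d → PySem.Int.floordiv n d = n / d := fun d hd =>
    PySem.Int.floordiv_eq_ediv_of_pos hd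
  have hlarge_mem : ∀ y : Int,
      (y ∈ ((PySem.List.pyRange 1 (s + 1)).filter
              (fun d => PySem.Int.mod n d == 0 && d * d != n)).map
             (fun d => PySem.Int.floordiv n d))
      ↔ ∃ e : Int, 1 ≤ e ∧ e ≤ s ∧ e ∣ n ∧ e * e ≠ n ∧ y = n / e := by
    intro y
    simp only [List.mem_map, List.mem_filter, PySem.List.mem_pyRange_one]
    constructor
    · rintro ⟨e, ⟨⟨he1, he2⟩, hq⟩, rfl⟩
      obtain ⟨hd, hne⟩ := (hQ e).1 hq
      exact ⟨e, he1, by omega, hd, hne, (hfd e (by omega))⟩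
    · rintro ⟨e, he1, he2, hd, hne, rfl⟩
      exact ⟨e, ⟨⟨he1, by omega⟩, (hQ e).2 ⟨hd, hne⟩⟩, (hfd e (by omega))⟩
  have hlarge_gt : ∀ e : Int, 1 ≤ e → e ≤ s → e ∣ n → e * e ≠ n → s < n / e := by
    intro e he1 he2 hd hne
    obtain ⟨hy0, hy1⟩ := hdivpos e (by omega) hd
    by_contra hc
    push_neg at hc
    have hee : e * e < n := lt_of_le_of_ne (by nlinarith) hne
    have h6 : e < n / e := by nlinarith [hy1]
    nlinarith [hy1, hs1, h6, hy0, mul_le_mul_of_nonneg_left hc (le_of_lt hy0)]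
  have sortL : ((PySem.List.pyRange 1 (n + 1)).filter
      (fun d => PySem.Int.mod n d == 0)).Pairwise (· < ·) :=
    (PySem.List.pairwise_lt_pyRange_one 1 (n + 1)).sublist List.filter_sublist
  have sortSmall : ((PySem.List.pyRange 1 (s + 1)).filter
      (fun d => PySem.Int.mod n d == 0)).Pairwise (· < ·) :=
    (PySem.List.pairwise_lt_pyRange_one 1 (s + 1)).sublist List.filter_sublist
  have sortFiltQ : ((PySem.List.pyRange 1 (s + 1)).filter
      (fun d => PySem.Int.mod n d == 0 && d * d != n)).Pairwise (· < ·) :=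
    (PySem.List.pairwise_lt_pyRange_one 1 (s + 1)).sublist List.filter_sublist
  have sortLargeRev : ((((PySem.List.pyRange 1 (s + 1)).filter
              (fun d => PySem.Int.mod n d == 0 && d * d != n)).map
             (fun d => PySem.Int.floordiv n d)).reverse).Pairwise (· < ·) := by
    rw [List.pairwise_reverse, List.pairwise_map]
    refine List.Pairwise.imp_of_mem ?_ sortFiltQ
    intro a b ha hb hab
    simp only [List.mem_filter, PySem.List.mem_pyRange_one] at ha hb
    obtain ⟨⟨ha1, ha2⟩, haq⟩ := ha
    obtain ⟨⟨hb1, hb2⟩, hbq⟩ := hb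
    obtain ⟨hda, -⟩ := (hQ a).1 haq
    obtain ⟨hdb, -⟩ := (hQ b).1 hbq
    obtain ⟨hqa0, hqa1⟩ := hdivpos a (by omega) hda
    obtain ⟨hqb0, hqb1⟩ := hdivpos b (by omega) hdb
    rw [hfd a (by omega), hfd b (by omega)]
    by_contra hc
    push_neg at hc
    nlinarith
  have sortR : (((PySem.List.pyRange 1 (s + 1)).filter (fun d => PySem.Int.mod n d == 0)
        ++ (((PySem.List.pyRange 1 (s + 1)).filter
              (fun d => PySem.Int.mod n d == 0 && d * d != n)).map
             (fun d => PySem.Int.floordiv n d)).reverse)).Pairwise (· < ·) := by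
    rw [List.pairwise_append]
    refine ⟨sortSmall, sortLargeRev, ?_⟩
    intro x hx y hy
    rw [List.mem_reverse] at hy
    rw [hlarge_mem y] at hy
    obtain ⟨e, he1, he2, hd, hne, rfl⟩ := hy
    simp only [List.mem_filter, PySem.List.mem_pyRange_one] at hx
    obtain ⟨⟨hx1, hx2⟩, -⟩ := hx
    have := hlarge_gt e he1 he2 hd hne
    omega
  have nodupL := sortL.nodup
  have nodupR := sortR.nodup
  have hmem : ∀ x : Int,
      x ∈ (PySem.List.pyRange 1 (n + 1)).filter (fun d => PySem.Int.mod n d == 0)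
      ↔ x ∈ ((PySem.List.pyRange 1 (s + 1)).filter (fun d => PySem.Int.mod n d == 0)
        ++ (((PySem.List.pyRange 1 (s + 1)).filter
              (fun d => PySem.Int.mod n d == 0 && d * d != n)).map
             (fun d => PySem.Int.floordiv n d)).reverse) := by
    intro x
    rw [List.mem_append, List.mem_reverse, hlarge_mem x]
    simp only [List.mem_filter, PySem.List.mem_pyRange_one, hP, hQ]
    constructor
    · rintro ⟨⟨hx1, hx2⟩, hdvd⟩
      by_cases hxs : x ≤ s
      · exact Or.inl ⟨⟨hx1, by omega⟩, hdvd⟩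
      · push_neg at hxs
        obtain ⟨hq0, hq1⟩ := hdivpos x (by omega) hdvd
        refine Or.inr ⟨n / x, by omega, ?_, ⟨x, by linarith [hq1]⟩, ?_, ?_⟩
        · by_contra hc
          push_neg at hc
          nlinarith
        · intro heq
          have hxe : n / x = x := mul_left_cancel₀ (ne_of_gt hq0) (heq.trans hq1.symm)
          have hxx : x * x = n := by nlinarith [hq1, hxe]
          nlinarith [hs2, hxx, hxs, hs0]
        · have h3 : n / (n / x) * (n / x) = n := Int.ediv_mul_cancel ⟨x, by linarith [hq1]⟩
          nlinarith [h3]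
    · rintro (⟨⟨hx1, hx2⟩, hdvd⟩ | ⟨e, he1, he2, hd, hne, rfl⟩)
      · exact ⟨⟨hx1, by omega⟩, hdvd⟩
      · obtain ⟨hq0, hq1⟩ := hdivpos e (by omega) hd
        refine ⟨⟨by omega, ?_⟩, ⟨e, by linarith [hq1]⟩⟩
        nlinarith
  have hperm := (List.perm_ext_iff_of_nodup nodupL nodupR).2 hmem
  exact List.eq_of_perm_of_sorted (fun a b _ _ h1 h2 => absurd (lt_trans h1 h2) (lt_irrefl a))
    sortL sortR hperm

-- overwriting the sole entry of a singleton dict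
lemma pvDictOverwrite {κ ν : Type} [BEq κ] [LawfulBEq κ] (k : κ) (v w : ν) :
    (PySem.Dict.empty.insert k v).insert k w = PySem.Dict.empty.insert k w := by
  apply PySem.Dict.ext
  rw [PySem.Dict.items_insert_of_contains _ _ (PySem.Dict.contains_insert_self _ _ _)]
  rw [PySem.Dict.items_insert_of_not_contains _ _ (by simp [PySem.Dict.contains_empty]),
      PySem.Dict.items_insert_of_not_contains _ _ (by simp [PySem.Dict.contains_empty])]
  simp [PySem.Dict.empty]

lemma pvMain (n : Int) (hpre : 0 ≤ n) :
    get_layout_options_for_length n = get_layout_options_for_length_alt n := by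
  by_cases h0 : n = 0
  · subst h0; decide
  · have hn : 1 ≤ n := by omega
    obtain ⟨hs0, hs1, hs2⟩ := pvIsqrt_spec n hpre
    have hs3 : 1 ≤ pvIsqrt n := (le_pvIsqrt_iff n 1 hpre one_pos).2 (by nlinarith)
    simp only [get_layout_options_for_length, get_layout_options_for_length_alt]
    rw [pvPairFold]
    simp only [List.nil_append]
    rw [← List.foldl_append]
    rw [PySem.List.foldl_if_eq_foldl_filter
      (fun rows => PySem.Int.mod n rows == 0)
      (fun (options : PySem.Dict String (Int × Int)) rows =>
        options.insert (PySem.Int.toStr rows ++ " × " ++ PySem.Int.toStr (PySem.Int.floordiv n rows))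
          (rows, PySem.Int.floordiv n rows))]
    rw [pvDivisorsSplit n hn]
    -- peel the leading divisor 1 and absorb the pre-inserted "1 × n" entry
    have hrange : PySem.List.pyRange 1 (pvIsqrt n + 1)
        = 1 :: PySem.List.pyRange 2 (pvIsqrt n + 1) := by
      have := PySem.List.pyRange_one_cons (a := 1) (b := pvIsqrt n + 1) (by omega)
      simpa using this
    have hP1 : (PySem.Int.mod n 1 == 0) = true := by
      rw [beq_iff_eq, PySem.Int.mod_eq_zero_iff_dvd]; exact one_dvd n
    have hsplit : (PySem.List.pyRange 1 (pvIsqrt n + 1)).filter (fun d => PySem.Int.mod n d == 0)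
        = 1 :: (PySem.List.pyRange 2 (pvIsqrt n + 1)).filter (fun d => PySem.Int.mod n d == 0) := by
      rw [hrange, List.filter_cons, if_pos hP1]
    rw [hsplit]
    simp only [List.cons_append, List.foldl_cons]
    -- the first loop insertion coincides with the pre-inserted entry
    have hdiv1 : PySem.Int.floordiv n 1 = n := by
      rw [PySem.Int.floordiv_eq_ediv_of_pos one_pos, Int.ediv_one]
    have hkey : PySem.Int.toStr 1 ++ " × " ++ PySem.Int.toStr (PySem.Int.floordiv n 1)
        = "1 × " ++ PySem.Int.toStr n := by
      rw [hdiv1]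
      congr 1
    rw [hkey, hdiv1, pvDictOverwrite]
    -- the two remaining folds have identical bodies over the same list; align the final loop
    apply congrArg
    apply PySem.List.foldl_congr_mem
    intro acc r hr
    rw [PySem.List.mem_pyRange_one] at hr
    have hr1 : (0 : Int) < r := by
      have : (1 : Int) ≤ max 1 (pvIsqrt n - 1) := le_max_left _ _
      omega
    have hceil : n ≤ r * -(PySem.Int.floordiv (-n) r) := by
      rw [PySem.Int.floordiv_eq_ediv_of_pos hr1]
      have := Int.ediv_mul_le (-n) (ne_of_gt hr1)
      nlinarith [this]
    simp only [if_pos hceil]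

-- ===== VERDICT (by name: the statement is the Claim_ definition above) =====
theorem get_layout_options_for_length_spec : Claim_equal_get_layout_options_for_length := by
  intro sequence_length _ hpre
  unfold Spec_get_layout_options_for_length
  exact pvMain sequence_length hpre
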